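-- pv_equiv track=rewrite | github.com/CharlesBryanJr/coding_interview_questions | sweetAndSavory.py | sweetAndSavory_nn_1
-- ===== SOURCE A (Python) =====
-- def sweetAndSavory_nn_1(dishes, target):
--     best_dishes = [0, 0]
--     if len(dishes) < 2:
--         return best_dishes
--
--     dishes.sort()
--     best_flavor = float('inf')
--
--     for i in range(len(dishes)):
--         if dishes[i] < 0:
--             continue
--         flavor_change = i
--         break
--
--     for left in range(0, flavor_change):
--         for right in range(flavor_change, len(dishes)):
--             flavor = dishes[left] + dishes[right]
--             if flavor > target:
--                 continue
--
--             diff = target - flavor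
--             if diff == 0:
--                 return [dishes[left], dishes[right]]
--
--             if diff < best_flavor:
--                 best_flavor = diff
--                 best_dishes[0] = dishes[left]
--                 best_dishes[1] = dishes[right]
--
--     return best_dishes
-- ===== SOURCE B (Python) =====
-- def sweetAndSavory_nn_1(dishes, target):
--     if len(dishes) < 2:
--         return [0, 0]
--     dishes.sort()
--     negs = [x for x in dishes if x < 0]
--     nonnegs = [x for x in dishes if x >= 0]
--     best = [0, 0]
--     best_sum = None
--     j = len(nonnegs) - 1
--     for a in negs:
--         while j >= 0 and a + nonnegs[j] > target:
--             j -= 1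
--         if j < 0:
--             break
--         s = a + nonnegs[j]
--         if s == target:
--             return [a, nonnegs[j]]
--         if best_sum is None or s > best_sum:
--             best_sum = s
--             best = [a, nonnegs[j]]
--     return best
-- ===== Notes on version B (the rewrite author's own statement) =====
-- stated objective: faster
-- what changed: Replaced A's nested left-right scan over all negative/nonnegative pairs by a single two-pointer sweep: a pointer into the sorted nonnegative part only moves left as the negative side increases, so the inner scan disappears (Pre_ excludes the all-negative inputs where A raises NameError).
import Mathlib
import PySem

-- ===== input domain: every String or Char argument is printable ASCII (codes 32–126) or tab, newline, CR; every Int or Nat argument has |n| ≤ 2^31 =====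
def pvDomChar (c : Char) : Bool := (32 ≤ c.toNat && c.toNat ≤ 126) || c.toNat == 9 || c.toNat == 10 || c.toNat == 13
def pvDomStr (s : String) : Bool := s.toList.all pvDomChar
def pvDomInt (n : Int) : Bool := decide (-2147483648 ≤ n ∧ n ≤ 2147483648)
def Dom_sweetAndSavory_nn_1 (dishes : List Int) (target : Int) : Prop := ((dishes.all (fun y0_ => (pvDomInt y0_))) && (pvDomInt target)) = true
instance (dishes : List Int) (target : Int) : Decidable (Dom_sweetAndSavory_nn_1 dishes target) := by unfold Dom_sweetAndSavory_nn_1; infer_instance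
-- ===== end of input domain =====

-- B replaces A's nested pair scan by a single two-pointer sweep over the sorted list (asymptotically
-- faster). Both A and B sort `dishes` in place (the equivalence proved here is about the return value;
-- B performs the same mutation).

-- ===== PORT A =====
-- first index i with dishes[i] >= 0 (the 'flavor_change' search loop); none = the loop never breaks
def pyFirstNonneg : List Int → Option Nat
  | [] => none
  | x :: xs => if x < 0 then (pyFirstNonneg xs).map (· + 1) else some 0

-- inner 'for right in range(flavor_change, len)' loop; state = (best_flavor, best_dishes),
-- best_flavor = none plays float('inf'); Sum.inl = the early 'return' on diff == 0
def pyInner (target a : Int) : List Int → Option Int × List Int → (List Int) ⊕ (Option Int × List Int)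
  | [], st => Sum.inr st
  | b :: bs, (bf, bd) =>
    let flavor := a + b
    if flavor > target then pyInner target a bs (bf, bd)
    else
      let diff := target - flavor
      if diff = 0 then Sum.inl [a, b]
      else if (match bf with | none => true | some v => decide (diff < v)) then
        pyInner target a bs (some diff, [a, b])
      else pyInner target a bs (bf, bd)

-- outer 'for left in range(0, flavor_change)' loop
def pyOuter (target : Int) (rights : List Int) : List Int → Option Int × List Int → List Int
  | [], (_, bd) => bd
  | a :: as, st =>
    match pyInner target a rights st with
    | Sum.inl res => res
    | Sum.inr st' => pyOuter target rights as st'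

def sweetAndSavory_nn_1 (dishes : List Int) (target : Int) : List Int :=
  if dishes.length < 2 then [0, 0]
  else
    let s := PySem.List.sorted dishes (fun x => x) false
    match pyFirstNonneg s with
    | none => [0, 0]   -- Python raises NameError here (flavor_change unbound); excluded by Pre_
    | some fc => pyOuter target (s.drop fc) (s.take fc) (none, [0, 0])

-- ===== PORT B =====
-- 'while j >= 0 and a + nonnegs[j] > target: j -= 1'; j is represented by the Nat c = j + 1
-- (c = 0 ⇔ j = -1), so each decrement is structural; the index c - 1 is in range whenever read
def altWhile (nonnegs : List Int) (target a : Int) : Nat → Nat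
  | 0 => 0
  | c + 1 => if a + nonnegs.getD c 0 > target then altWhile nonnegs target a c else c + 1

-- 'for a in negs' with the persistent pointer c and state (best_sum, best)
def altLoop (nonnegs : List Int) (target : Int) : List Int → Nat → Option Int × List Int → List Int
  | [], _, (_, bd) => bd
  | a :: as, c, (bs, bd) =>
    let c' := altWhile nonnegs target a c
    if c' = 0 then bd      -- 'if j < 0: break' and return best
    else
      let m := nonnegs.getD (c' - 1) 0
      let s := a + m
      if s = target then [a, m]
      else if (match bs with | none => true | some v => decide (s > v)) then
        altLoop nonnegs target as c' (some s, [a, m])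
      else altLoop nonnegs target as c' (bs, bd)

def sweetAndSavory_nn_1_alt (dishes : List Int) (target : Int) : List Int :=
  if dishes.length < 2 then [0, 0]
  else
    let s := PySem.List.sorted dishes (fun x => x) false
    let negs := s.filter (fun x => decide (x < 0))
    let nonnegs := s.filter (fun x => decide (0 ≤ x))
    altLoop nonnegs target negs nonnegs.length (none, [0, 0])

-- ===== PRECONDITION & SPEC =====
-- Pre_ excludes exactly the inputs where A raises NameError: len(dishes) >= 2 with every dish negative
-- (the 'flavor_change' loop never breaks).
def Pre_sweetAndSavory_nn_1 (dishes : List Int) (target : Int) : Prop :=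
  dishes.length < 2 ∨ ∃ x ∈ dishes, 0 ≤ x
instance (dishes : List Int) (target : Int) : Decidable (Pre_sweetAndSavory_nn_1 dishes target) := by unfold Pre_sweetAndSavory_nn_1; infer_instance

def pvWitness_sweetAndSavory_nn_1 : List Int × Int := ([-2, 3], 5)

def Spec_sweetAndSavory_nn_1 (dishes : List Int) (target : Int) (out : List Int) : Prop := out = sweetAndSavory_nn_1_alt dishes target
instance (dishes : List Int) (target : Int) (out : List Int) : Decidable (Spec_sweetAndSavory_nn_1 dishes target out) := by unfold Spec_sweetAndSavory_nn_1; infer_instance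

-- ===== CLAIM (what is proved, stated in full; the proofs are below) =====
def Claim_equal_sweetAndSavory_nn_1 : Prop := ∀ (dishes : List Int) (target : Int), Dom_sweetAndSavory_nn_1 dishes target → Pre_sweetAndSavory_nn_1 dishes target → Spec_sweetAndSavory_nn_1 dishes target (sweetAndSavory_nn_1 dishes target)


-- ===== LEMMAS AND PROOFS =====

-- the prefix of the nonnegative part still summing within target for left value a
def pvPrefix (target a : Int) (l : List Int) : List Int := l.takeWhile (fun b => decide (a + b ≤ target))

-- on a sorted list the takeWhile prefix of the downward-closed guard is index-characterised
theorem pvTakeWhile_idx (target a : Int) (l : List Int) (hs : l.Pairwise (· ≤ ·)) :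
    ∀ i (hi : i < l.length), (i < (pvPrefix target a l).length ↔ a + l[i] ≤ target) := by
  induction l with
  | nil => intro i hi; simp at hi
  | cons x xs ih =>
    intro i hi
    rcases List.pairwise_cons.mp hs with ⟨hx, hxs⟩
    by_cases hpx : a + x ≤ target
    · cases i with
      | zero =>
        simp only [pvPrefix, List.takeWhile_cons, decide_eq_true hpx, List.getElem_cons_zero]
        simpa using hpx
      | succ j =>
        have := ih hxs j (by simpa using hi)
        simp only [pvPrefix, List.takeWhile_cons, decide_eq_true hpx, List.getElem_cons_succ,
          if_true, List.length_cons] at *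
        omega
    · simp only [pvPrefix, List.takeWhile_cons]
      rw [if_neg (by simpa using hpx)]
      simp only [List.length_nil]
      constructor
      · intro h; omega
      · intro h
        exfalso
        cases i with
        | zero => simp at h; exact hpx h
        | succ j =>
          have hj : j < xs.length := by simpa using hi
          have hle : x ≤ xs[j] := hx _ (List.getElem_mem hj)
          simp only [List.getElem_cons_succ] at h
          omega

theorem pvPrefix_len_le (target a : Int) (l : List Int) : (pvPrefix target a l).length ≤ l.length :=
  (List.takeWhile_prefix _).length_le

theorem pvPrefix_mono (target : Int) {a a' : Int} (h : a ≤ a') (l : List Int) :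
    (pvPrefix target a' l).length ≤ (pvPrefix target a l).length := by
  induction l with
  | nil => simp [pvPrefix]
  | cons x xs ih =>
    by_cases hp : a' + x ≤ target
    · have hp2 : a + x ≤ target := by omega
      simp only [pvPrefix, List.takeWhile_cons, decide_eq_true hp, decide_eq_true hp2,
        if_true, List.length_cons] at *
      omega
    · simp only [pvPrefix, List.takeWhile_cons]
      rw [if_neg (by simpa using hp)]
      simp

-- the while loop stops exactly at the prefix length, provided the pointer starts at or past it
theorem pvWhile_eq (target a : Int) (l : List Int) (hs : l.Pairwise (· ≤ ·)) :
    ∀ c : Nat, (pvPrefix target a l).length ≤ c → c ≤ l.length →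
      altWhile l target a c = (pvPrefix target a l).length := by
  intro c
  induction c with
  | zero => intro h1 _; simp [altWhile]; omega
  | succ c ih =>
    intro h1 h2
    have hc : c < l.length := by omega
    have hidx := pvTakeWhile_idx target a l hs c hc
    have hgd : l.getD c 0 = l[c] := List.getD_eq_getElem l 0 hc
    by_cases hg : a + l[c] ≤ target
    · have hP : c < (pvPrefix target a l).length := hidx.mpr hg
      simp only [altWhile, hgd]
      rw [if_neg (by omega)]
      omega
    · have hP : (pvPrefix target a l).length ≤ c := by
        by_contra hcon
        exact hg (hidx.mp (by omega))
      simp only [altWhile, hgd]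
      rw [if_pos (by omega)]
      exact ih hP (by omega)

-- the tail prefix is empty when the head already fails the guard
theorem pvPrefix_tail_nil (target a b : Int) (bs : List Int) (hx : ∀ y ∈ bs, b ≤ y)
    (hpb : ¬ a + b ≤ target) : (pvPrefix target a bs).length = 0 := by
  cases bs with
  | nil => simp [pvPrefix]
  | cons y ys =>
    have hby : b ≤ y := hx y List.mem_cons_self
    simp only [pvPrefix, List.takeWhile_cons]
    rw [if_neg (by simp; omega)]
    simp

-- A's inner loop, characterised by the last element of the valid prefix
theorem pvInner_eq (target a : Int) (l : List Int) (hs : l.Pairwise (· ≤ ·)) :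
    ∀ bf bd, pyInner target a l (bf, bd) =
      (if (pvPrefix target a l).length = 0 then Sum.inr (bf, bd)
       else if target - (a + l.getD ((pvPrefix target a l).length - 1) 0) = 0 then
         Sum.inl [a, l.getD ((pvPrefix target a l).length - 1) 0]
       else if (match bf with
                | none => true
                | some v => decide (target - (a + l.getD ((pvPrefix target a l).length - 1) 0) < v)) then
         Sum.inr (some (target - (a + l.getD ((pvPrefix target a l).length - 1) 0)),
                  [a, l.getD ((pvPrefix target a l).length - 1) 0])
       else Sum.inr (bf, bd)) := by
  induction l with
  | nil => intro bf bd; simp [pyInner, pvPrefix]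
  | cons b bs ih =>
    intro bf bd
    rcases List.pairwise_cons.mp hs with ⟨hx, hbs⟩
    by_cases hpb : a + b ≤ target
    case neg =>
      -- head invalid: whole prefix empty, inner loop is the identity on the state
      have h0 : (pvPrefix target a (b :: bs)).length = 0 := by
        simp only [pvPrefix, List.takeWhile_cons]
        rw [if_neg (by simpa using hpb)]; simp
      rw [if_pos h0]
      simp only [pyInner]
      rw [if_pos (by omega)]
      rw [ih hbs bf bd, if_pos (pvPrefix_tail_nil target a b bs hx hpb)]
    case pos =>
      have hpre : pvPrefix target a (b :: bs) = b :: pvPrefix target a bs := by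
        simp [pvPrefix, hpb]
      have hL : (pvPrefix target a (b :: bs)).length = (pvPrefix target a bs).length + 1 := by
        rw [hpre, List.length_cons]
      rw [if_neg (by omega)]
      simp only [pyInner]
      rw [if_neg (by omega : ¬ a + b > target)]
      cases hP0 : (pvPrefix target a bs).length with
      | zero =>
        -- tail prefix empty: the last valid element is b and the tail recursion keeps the state
        have hM : (b :: bs).getD ((pvPrefix target a (b :: bs)).length - 1) 0 = b := by
          rw [hL, hP0]; simp
        rw [hM]
        rw [ih hbs (some (target - (a + b))) [a, b], if_pos hP0,
            ih hbs bf bd, if_pos hP0]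
      | succ p =>
        -- tail prefix nonempty: the last valid element is bs[p]
        have hplt : p < bs.length := by have := pvPrefix_len_le target a bs; omega
        have hgd : bs.getD ((pvPrefix target a bs).length - 1) 0 = bs[p] := by
          rw [hP0]; simpa using List.getD_eq_getElem bs 0 hplt
        have hM : (b :: bs).getD ((pvPrefix target a (b :: bs)).length - 1) 0 = bs[p] := by
          rw [hL, hP0]; simpa using List.getD_eq_getElem bs 0 hplt
        have hvalM : a + bs[p] ≤ target := (pvTakeWhile_idx target a bs hbs p hplt).mp (by omega)
        have hbM : b ≤ bs[p] := hx _ (List.getElem_mem hplt)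
        rw [hM]
        rw [ih hbs (some (target - (a + b))) [a, b], ih hbs bf bd]
        rw [if_neg (show ¬((pvPrefix target a bs).length = 0) by omega)]
        rw [if_neg (show ¬((pvPrefix target a bs).length = 0) by omega)]
        rw [hgd]
        rcases bf with _ | v <;>
        · simp only [decide_eq_true_eq]
          split_ifs <;> first | rfl | (exfalso; omega) |
            (have hMb : bs[p] = b := by omega
             simp [hMb])

-- once no right partner fits, A's remaining outer iterations are no-ops
theorem pvOuter_skip (target : Int) (l : List Int) (hs : l.Pairwise (· ≤ ·)) :
    ∀ lefts bf bd, (∀ a ∈ lefts, (pvPrefix target a l).length = 0) →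
      pyOuter target l lefts (bf, bd) = bd := by
  intro lefts
  induction lefts with
  | nil => intro bf bd _; simp [pyOuter]
  | cons a as ih =>
    intro bf bd hall
    simp only [pyOuter]
    rw [pvInner_eq target a l hs bf bd, if_pos (hall a List.mem_cons_self)]
    exact ih bf bd (fun a' ha' => hall a' (List.mem_cons_of_mem a ha'))

-- main loop correspondence: A's nested scan equals B's two-pointer sweep
theorem pvMain (target : Int) (l : List Int) (hs : l.Pairwise (· ≤ ·)) :
    ∀ (lefts : List Int) (c : Nat) (bs : Option Int) (bd : List Int),
      lefts.Pairwise (· ≤ ·) →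
      (∀ a ∈ lefts, (pvPrefix target a l).length ≤ c) →
      c ≤ l.length →
      pyOuter target l lefts (bs.map (fun s => target - s), bd) = altLoop l target lefts c (bs, bd) := by
  intro lefts
  induction lefts with
  | nil => intro c bs bd _ _ _; simp [pyOuter, altLoop]
  | cons a as ih =>
    intro c bs bd hpw hall hc
    rcases List.pairwise_cons.mp hpw with ⟨ha, has⟩
    have hwe : altWhile l target a c = (pvPrefix target a l).length :=
      pvWhile_eq target a l hs c (hall a List.mem_cons_self) hc
    have hmono : ∀ a' ∈ as, (pvPrefix target a' l).length ≤ (pvPrefix target a l).length :=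
      fun a' ha' => pvPrefix_mono target (ha a' ha') l
    simp only [pyOuter, altLoop, hwe]
    rw [pvInner_eq target a l hs (bs.map (fun s => target - s)) bd]
    cases hP0 : (pvPrefix target a l).length with
    | zero =>
      rw [if_pos rfl]
      exact pvOuter_skip target l hs as _ bd (fun a' ha' => by have := hmono a' ha'; omega)
    | succ p =>
      rw [if_neg (by omega)]
      rw [if_neg (Nat.succ_ne_zero p)]
      have hPle : (pvPrefix target a l).length ≤ l.length := pvPrefix_len_le target a l
      set M := l.getD (p + 1 - 1) 0 with hMdef
      by_cases heq : a + M = target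
      · rw [if_pos (by omega), if_pos heq]
      · rw [if_neg (by omega), if_neg heq]
        have hih := fun bs' bd' => ih (p + 1) bs' bd' has (fun a' ha' => by have := hmono a' ha'; omega) (by omega)
        rcases bs with _ | v
        · simp only [Option.map_none]
          rw [if_pos trivial, if_pos trivial]
          have := hih (some (a + M)) [a, M]
          simpa using this
        · simp only [Option.map_some, decide_eq_true_eq]
          by_cases hlt : a + M > v
          · rw [if_pos (show target - (a + M) < target - v by omega), if_pos hlt]
            have := hih (some (a + M)) [a, M]
            simpa using this
          · rw [if_neg (show ¬(target - (a + M) < target - v) by omega), if_neg hlt]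
            have := hih (some v) bd
            simpa using this

-- firstNonneg splits the sorted list into its negative and nonnegative parts
theorem pvSplit (s : List Int) (hs : s.Pairwise (· ≤ ·)) :
    ∀ fc, pyFirstNonneg s = some fc →
      s.take fc = s.filter (fun x => decide (x < 0)) ∧ s.drop fc = s.filter (fun x => decide (0 ≤ x)) := by
  induction s with
  | nil => intro fc h; simp [pyFirstNonneg] at h
  | cons x xs ih =>
    intro fc h
    rcases List.pairwise_cons.mp hs with ⟨hx, hxs⟩
    by_cases hneg : x < 0
    · rw [pyFirstNonneg, if_pos hneg] at h
      rcases Option.map_eq_some_iff.mp h with ⟨fc', hfc', rfl⟩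
      rcases ih hxs fc' hfc' with ⟨h1, h2⟩
      constructor
      · simp [hneg, h1]
      · simp only [List.drop_succ_cons, h2, List.filter_cons]
        rw [if_neg (by simp; omega)]
    · rw [pyFirstNonneg, if_neg hneg] at h
      have hfc : fc = 0 := by simpa using h.symm
      subst hfc
      have hall : ∀ y ∈ x :: xs, 0 ≤ y := by
        intro y hy
        rcases List.mem_cons.mp hy with rfl | hy'
        · omega
        · have := hx y hy'; omega
      constructor
      · rw [List.take_zero, List.filter_eq_nil_iff.mpr]
        intro y hy
        have := hall y hy
        simp; omega
      · rw [List.drop_zero, (List.filter_eq_self (p := fun x => decide (0 ≤ x))).mpr]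
        intro y hy
        simpa using hall y hy

theorem pvFirst_some (s : List Int) (x : Int) (hx : x ∈ s) (hx0 : 0 ≤ x) :
    ∃ fc, pyFirstNonneg s = some fc := by
  induction s with
  | nil => simp at hx
  | cons y ys ih =>
    by_cases hy : y < 0
    · rcases List.mem_cons.mp hx with rfl | hx'
      · omega
      · rcases ih hx' with ⟨fc, hfc⟩
        exact ⟨fc + 1, by simp [pyFirstNonneg, hy, hfc]⟩
    · exact ⟨0, by simp [pyFirstNonneg, hy]⟩

-- ===== VERDICT (by name: the statement is the Claim_ definition above) =====
theorem sweetAndSavory_nn_1_spec : Claim_equal_sweetAndSavory_nn_1 := by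
  intro dishes target _ hpre
  unfold Spec_sweetAndSavory_nn_1 sweetAndSavory_nn_1 sweetAndSavory_nn_1_alt
  by_cases hlen : dishes.length < 2
  · rw [if_pos hlen, if_pos hlen]
  · rw [if_neg hlen, if_neg hlen]
    simp only []
    rcases hpre with h | ⟨x, hx, hx0⟩
    · omega
    · set s := PySem.List.sorted dishes (fun x => x) false with hsdef
      have hs : s.Pairwise (· ≤ ·) := PySem.List.sorted_pairwise dishes (fun x => x)
      have hxs : x ∈ s := (PySem.List.mem_sorted dishes (fun x => x) false x).mpr hx
      rcases pvFirst_some s x hxs hx0 with ⟨fc, hfc⟩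
      simp only [hfc]
      rcases pvSplit s hs fc hfc with ⟨h1, h2⟩
      rw [h1, h2]
      have hnegpw : (s.filter (fun x => decide (x < 0))).Pairwise (· ≤ ·) :=
        hs.sublist List.filter_sublist
      have := pvMain target (s.filter (fun x => decide (0 ≤ x))) (hs.sublist List.filter_sublist)
        (s.filter (fun x => decide (x < 0))) (s.filter (fun x => decide (0 ≤ x))).length none [0, 0]
        hnegpw (fun a _ => pvPrefix_len_le target a _) le_rfl
      simpa using this
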